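-- pv_equiv track=rewrite | github.com/OtotaO/SUM | knowledge_crystallizer.py | _find_central_sentence
-- ===== SOURCE A (Python) =====
-- from typing import Dict, List, Any, Optional, Tuple
--
-- def _find_central_sentence(components: Dict) -> str:
--     """Find the most central/important sentence"""
--     if not components['sentences']:
--         return ""
--
--     # Score each sentence by how many key elements it contains
--     scores = []
--     for sentence in components['sentences']:
--         score = 0
--         score += sum(1 for e in components['entities'] if e in sentence) * 2
--         score += sum(1 for t in components['topics'] if t in sentence.lower())
--         score += len([n for n in components['numbers'] if n in sentence])
--         scores.append((score, sentence))
--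
--     scores.sort(reverse=True, key=lambda x: x[0])
--     return scores[0][1] if scores else components['sentences'][0]
-- ===== SOURCE B (Python) =====
-- def _find_central_sentence(components):
--     """Find the most central/important sentence (single pass, no sort)."""
--     sentences = components['sentences']
--     if not sentences:
--         return ""
--     entities = components['entities']
--     topics = components['topics']
--     numbers = components['numbers']
--
--     def score(sentence):
--         low = sentence.lower()
--         return (sum(1 for e in entities if e in sentence) * 2
--                 + sum(1 for t in topics if t in low)
--                 + sum(1 for n in numbers if n in sentence))
--
--     best = sentences[0]
--     best_score = score(best)
--     for s in sentences[1:]: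
--         sc = score(s)
--         if sc > best_score:
--             best, best_score = s, sc
--     return best
-- ===== Notes on version B (the rewrite author's own statement) =====
-- stated objective: simpler
-- what changed: B replaces A's build-a-(score,sentence)-list-then-stable-reverse-sort-and-take-head with a single pass keeping the running best sentence, updating only on a strictly greater score so the first maximum wins exactly as the stable sort does.
-- outside the precondition, e.g. on _find_central_sentence({'sentences': ['a'], 'entities': [], 'topics': []}): A raises KeyError, B raises KeyError
import Mathlib
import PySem

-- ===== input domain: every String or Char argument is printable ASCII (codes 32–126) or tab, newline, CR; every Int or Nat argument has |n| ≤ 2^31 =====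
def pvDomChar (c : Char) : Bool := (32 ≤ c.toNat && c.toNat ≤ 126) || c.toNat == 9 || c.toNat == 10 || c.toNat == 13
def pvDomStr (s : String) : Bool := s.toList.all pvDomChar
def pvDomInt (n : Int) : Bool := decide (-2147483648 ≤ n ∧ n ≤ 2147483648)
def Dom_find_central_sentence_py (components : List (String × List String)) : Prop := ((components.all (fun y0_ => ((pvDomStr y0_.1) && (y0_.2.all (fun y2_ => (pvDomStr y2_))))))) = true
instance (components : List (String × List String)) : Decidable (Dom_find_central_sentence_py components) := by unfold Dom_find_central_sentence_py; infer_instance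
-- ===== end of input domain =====

-- B replaces A's score-list + stable reverse sort + take-head with one pass keeping the running best
-- sentence (strict > so the first maximum wins); proved to return the same sentence wherever A returns.


-- ===== PORT A =====
-- the per-sentence scoring expression, identical in both Python sources:
-- sum(1 for e in entities if e in sentence)*2 + sum(1 for t in topics if t in sentence.lower())
--   + len([n for n in numbers if n in sentence])
def pvScore (entities topics numbers : List String) (sentence : String) : Int :=
  ((entities.countP (fun e => PySem.Str.isIn e sentence) : Nat) : Int) * 2
  + ((topics.countP (fun t => PySem.Str.isIn t (PySem.Str.lower sentence)) : Nat) : Int)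
  + (((numbers.filter (fun n => PySem.Str.isIn n sentence)).length : Nat) : Int)

def find_central_sentence_py (components : List (String × List String)) : String :=
  let d := PySem.Dict.mk components
  let sentences := (d.get? "sentences").getD []
  if sentences = [] then ""
  else
    let entities := (d.get? "entities").getD []
    let topics := (d.get? "topics").getD []
    let numbers := (d.get? "numbers").getD []
    let scores := sentences.map (fun s => (pvScore entities topics numbers s, s))
    match PySem.List.sorted scores (fun x => x.1) true with
    | [] => (PySem.List.pyGet? sentences 0).getD ""   -- unreachable: scores nonempty here
    | p :: _ => p.2

-- ===== PORT B =====
def find_central_sentence_py_alt (components : List (String × List String)) : String :=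
  let d := PySem.Dict.mk components
  match (d.get? "sentences").getD [] with
  | [] => ""
  | s0 :: rest =>
    let entities := (d.get? "entities").getD []
    let topics := (d.get? "topics").getD []
    let numbers := (d.get? "numbers").getD []
    let score := pvScore entities topics numbers
    (rest.foldl (fun (b : Int × String) s =>
        if b.1 < score s then (score s, s) else b) (score s0, s0)).2

-- ===== PRECONDITION & SPEC =====
-- Pre_ excludes exactly the inputs where Python A raises KeyError: the 'sentences' key must be
-- present, and when its list is nonempty the 'entities'/'topics'/'numbers' keys must be present too.
def Pre_find_central_sentence_py (components : List (String × List String)) : Prop :=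
  let d := PySem.Dict.mk components
  (d.get? "sentences").isSome ∧
  ((d.get? "sentences").getD [] ≠ [] →
    (d.get? "entities").isSome ∧ (d.get? "topics").isSome ∧ (d.get? "numbers").isSome)
instance (components : List (String × List String)) : Decidable (Pre_find_central_sentence_py components) := by unfold Pre_find_central_sentence_py; infer_instance

def pvWitness_find_central_sentence_py : (List (String × List String)) :=
  [("sentences", ["The cat sat.", "Rates rose 5%."]), ("entities", ["Rates"]),
   ("topics", ["cat"]), ("numbers", ["5%"])]

def Spec_find_central_sentence_py (components : List (String × List String)) (out : String) : Prop := out = find_central_sentence_py_alt components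
instance (components : List (String × List String)) (out : String) : Decidable (Spec_find_central_sentence_py components out) := by unfold Spec_find_central_sentence_py; infer_instance

-- ===== CLAIM (what is proved, stated in full; the proofs are below) =====
def Claim_equal_find_central_sentence_py : Prop := ∀ (components : List (String × List String)), Dom_find_central_sentence_py components → Pre_find_central_sentence_py components → Spec_find_central_sentence_py components (find_central_sentence_py components)

-- ===== LEMMAS AND PROOFS =====

-- head of insertBy with the reverse-sort comparison: the incoming element takes the head
-- only when its key is strictly greater (stability: ties keep the old head).
lemma head?_insertBy_rev (x : Int × String) (m : Int × String) (t : List (Int × String)) :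
    (PySem.List.insertBy (fun a b => decide ((b : Int × String).1 < a.1)) x (m :: t)).head?
      = some (if m.1 < x.1 then x else m) := by
  simp [PySem.List.insertBy]
  split_ifs <;> simp

-- running the insertion-sort fold over xs moves the head exactly like the strict-> running-max fold
lemma head?_foldl_insertBy (xs : List (Int × String)) :
    ∀ (m : Int × String) (t : List (Int × String)),
    (xs.foldl (fun acc x => PySem.List.insertBy (fun a b => decide ((b : Int × String).1 < a.1)) x acc) (m :: t)).head?
      = some (xs.foldl (fun b x => if b.1 < x.1 then x else b) m) := by
  induction xs with
  | nil => intro m t; simp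
  | cons x xs ih =>
    intro m t
    simp only [List.foldl_cons]
    have h := head?_insertBy_rev x m t
    rcases hins : PySem.List.insertBy (fun a b => decide ((b : Int × String).1 < a.1)) x (m :: t) with _ | ⟨m', t'⟩
    · simp [hins] at h
    · rw [hins] at h
      simp only [List.head?_cons, Option.some.injEq] at h
      rw [ih m' t', h]

-- the head of Python's stable reverse sort of a nonempty score list IS B's single pass
lemma sorted_rev_head (p : Int × String) (ps : List (Int × String)) :
    (PySem.List.sorted (p :: ps) (fun x => x.1) true).head?
      = some (ps.foldl (fun b x => if b.1 < x.1 then x else b) p) := by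
  rw [PySem.List.sorted_rev_eq_foldl_insertBy]
  simp only [List.foldl_cons, PySem.List.insertBy]
  exact head?_foldl_insertBy ps p []

-- ===== VERDICT (by name: the statement is the Claim_ definition above) =====
theorem find_central_sentence_py_spec : Claim_equal_find_central_sentence_py := by
  intro components _ _
  unfold Spec_find_central_sentence_py find_central_sentence_py find_central_sentence_py_alt
  simp only []
  rcases hs : (PySem.Dict.mk components).get? "sentences" |>.getD [] with _ | ⟨s0, rest⟩
  · simp
  · simp only [if_neg (List.cons_ne_nil s0 rest)]
    set ents := ((PySem.Dict.mk components).get? "entities").getD [] with hents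
    set tops := ((PySem.Dict.mk components).get? "topics").getD [] with htops
    set nums := ((PySem.Dict.mk components).get? "numbers").getD [] with hnums
    have hmap : (s0 :: rest).map (fun s => (pvScore ents tops nums s, s))
        = (pvScore ents tops nums s0, s0) :: rest.map (fun s => (pvScore ents tops nums s, s)) := rfl
    rw [hmap]
    have hh := sorted_rev_head (pvScore ents tops nums s0, s0)
      (rest.map (fun s => (pvScore ents tops nums s, s)))
    rcases hsor : PySem.List.sorted ((pvScore ents tops nums s0, s0) :: rest.map (fun s => (pvScore ents tops nums s, s))) (fun x => x.1) true with _ | ⟨q, qs⟩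
    · rw [hsor] at hh; simp at hh
    · rw [hsor] at hh
      simp only [List.head?_cons, Option.some.injEq] at hh
      rw [hh, List.foldl_map]
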